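-- pv_equiv track=rewrite | github.com/DrakeSeteraO/5-Bit-Computer-Emulator | CodeLanguageBackEnd/Mathematics.py | parenthesis_split
-- ===== SOURCE A (Python) =====
-- def parenthesis_split(equation: str) -> list[str, str, str]:
--     """Attempts to locate parenthesis
--
--     Args:
--         equation (str): equation to find parenthesis in
--
--     Returns:
--         list[str, str, str]: left side of equation, math symbol, right side of equation
--     """
--
--
--     found_left = False
--     found_right = False
--     layer = 0
--     L_index = -1
--     R_index = -1
--
--     i = 0
--     while i < len(equation) and not found_right:
--         if equation[i] == '(' and not found_left:
--             found_left = True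
--             layer = 1
--             L_index = i
--
--         elif equation[i] == '(':
--             layer += 1
--
--         elif equation[i] == ')':
--             layer -= 1
--
--         if found_left and layer == 0 and not found_right:
--             found_right = True
--             R_index = i
--
--         i += 1
--
--     if L_index > 0:
--         return [equation[:L_index-1], equation[L_index-1], equation[L_index:]]
--     elif L_index == 0 and R_index == len(equation) - 1:
--         return [equation[1:-1]]
--     elif L_index == 0:
--         right = equation[R_index+2:]
--         if equation[R_index+2] == '(' and equation[-1] == ')':
--             right = equation[R_index+3:-1]
--
--         return [equation[1:R_index], equation[R_index+1], right]
--     elif L_index == -1: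
--         return [equation]
-- ===== SOURCE B (Python) =====
-- def parenthesis_split(equation: str) -> list[str, str, str]:
--     """Split an equation around its first outermost parenthesis group.
--
--     Alternative characterization: instead of a depth counter carried through one
--     scan, the matching ')' of a leading '(' is the first ')' at index j such
--     that the prefix equation[:j+1] contains equally many '(' and ')'.
--     """
--     L = equation.find('(')
--     if L == -1:
--         return [equation]
--     if L > 0:
--         return [equation[:L - 1], equation[L - 1], equation[L:]]
--     # here L == 0: the equation starts with '('
--     n = len(equation)
--     R = next((j for j in range(1, n)
--               if equation[j] == ')'
--               and equation[:j + 1].count('(') == equation[:j + 1].count(')')),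
--              -1)
--     if R == n - 1:
--         return [equation[1:-1]]
--     right = equation[R + 2:]
--     if equation[R + 2] == '(' and equation[-1] == ')':
--         right = equation[R + 3:-1]
--     return [equation[1:R], equation[R + 1], right]
-- ===== Notes on version B (the rewrite author's own statement) =====
-- stated objective: alternative
-- what changed: Drops A's depth-counter state machine: B characterises the matching ')' by counting -- the first ')' at index j whose prefix equation[:j+1] has equally many '(' and ')' -- searched with a generator over candidate indices, computed only in the L==0 branch.
import Mathlib
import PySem

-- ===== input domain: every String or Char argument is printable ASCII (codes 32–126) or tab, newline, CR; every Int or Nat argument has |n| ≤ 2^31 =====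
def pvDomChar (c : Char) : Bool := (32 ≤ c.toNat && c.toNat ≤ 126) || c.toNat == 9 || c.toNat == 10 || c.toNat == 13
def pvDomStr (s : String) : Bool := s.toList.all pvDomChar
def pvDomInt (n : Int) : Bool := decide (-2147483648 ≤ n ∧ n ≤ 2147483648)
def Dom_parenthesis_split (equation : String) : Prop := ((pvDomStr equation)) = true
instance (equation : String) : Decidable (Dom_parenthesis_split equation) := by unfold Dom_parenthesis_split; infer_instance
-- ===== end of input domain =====

-- B drops A's depth-counter state machine: the matching ')' is characterised by counting
-- ('first ')' at index j with equally many '(' and ')' in equation[:j+1]'), searched over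
-- candidate indices, and only computed in the L = 0 branch (objective: alternative).

-- ===== PORT A =====

-- Python single-char indexing equation[i] as a (1-char) string; none = IndexError.
def pvChar (o : Option Char) : String :=
  match o with
  | some c => String.ofList [c]
  | none => ""

-- A's while loop: state (found_left, layer, L_index, R_index), index i; stops when found_right.
def pvLoopA : List Char → Int → Bool → Int → Int → Int → Int × Int
  | [], _, _, _, L, R => (L, R)
  | c :: rest, i, foundL, layer, L, R =>
    let s : Bool × Int × Int :=
      if c = '(' ∧ foundL = false then (true, 1, i)
      else if c = '(' then (foundL, layer + 1, L)
      else if c = ')' then (foundL, layer - 1, L)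
      else (foundL, layer, L)
    if s.1 = true ∧ s.2.1 = 0 then (s.2.2, i)   -- found_right: loop exits with R_index = i
    else pvLoopA rest (i + 1) s.1 s.2.1 s.2.2 R

def parenthesis_split (equation : String) : List String :=
  let r := pvLoopA equation.toList 0 false 0 (-1) (-1)
  let L := r.1
  let R := r.2
  if L > 0 then
    [PySem.Str.slice equation none (some (L - 1)),
     pvChar (PySem.Str.pyGet? equation (L - 1)),
     PySem.Str.slice equation (some L) none]
  else if L = 0 ∧ R = (equation.toList.length : Int) - 1 then
    [PySem.Str.slice equation (some 1) (some (-1))]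
  else if L = 0 then
    match PySem.Str.pyGet? equation (R + 2) with
    | none => []   -- Python raises IndexError here; excluded by Pre_
    | some c =>
      let right := PySem.Str.slice equation (some (R + 2)) none
      let right := if c = '(' ∧ PySem.Str.pyGet? equation (-1) = some ')'
        then PySem.Str.slice equation (some (R + 3)) (some (-1))
        else right
      [PySem.Str.slice equation (some 1) (some R),
       pvChar (PySem.Str.pyGet? equation (R + 1)),
       right]
  else [equation]   -- here L = -1

-- ===== PORT B =====

def parenthesis_split_alt (equation : String) : List String :=
  let L := PySem.Str.find equation "("
  if L = -1 then [equation]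
  else if L > 0 then
    [PySem.Str.slice equation none (some (L - 1)),
     pvChar (PySem.Str.pyGet? equation (L - 1)),
     PySem.Str.slice equation (some L) none]
  else
    -- here L == 0: the equation starts with '('
    let cs := equation.toList
    let n : Int := cs.length
    -- first j in range(1, n) with equation[j] == ')' and equal paren counts in equation[:j+1]
    let R : Int :=
      match (PySem.List.pyRange 1 n 1).find?
          (fun j => (PySem.List.pyGet? cs j == some ')') &&
            ((PySem.List.slice cs none (some (j + 1))).count '(' ==
             (PySem.List.slice cs none (some (j + 1))).count ')')) with
      | some j => j
      | none => -1
    if R = n - 1 then [PySem.Str.slice equation (some 1) (some (-1))]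
    else
      match PySem.Str.pyGet? equation (R + 2) with
      | none => []   -- Python raises IndexError here; excluded by Pre_
      | some c =>
        let right := if c = '(' ∧ PySem.Str.pyGet? equation (-1) = some ')'
          then PySem.Str.slice equation (some (R + 3)) (some (-1))
          else PySem.Str.slice equation (some (R + 2)) none
        [PySem.Str.slice equation (some 1) (some R),
         pvChar (PySem.Str.pyGet? equation (R + 1)),
         right]

-- ===== PRECONDITION & SPEC =====

-- Parenthesis balance of a character list: #'(' - #')'.
def pvBal (cs : List Char) : Int := (cs.count '(' : Int) - (cs.count ')' : Int)

-- When the string starts with '(', the index of its matching ')' is the least j ≥ 1 at which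
-- the prefix balance returns to 0 (none if never).
def pvCloseIdx (cs : List Char) : Option Nat :=
  (List.range cs.length).find? (fun j => decide (1 ≤ j) && decide (pvBal (cs.take (j + 1)) = 0))

-- Pre_ excludes exactly the inputs on which A raises IndexError at equation[R_index+2]:
-- the string "(" itself, and strings starting with '(' whose matching ')' sits at index len-2.
def Pre_parenthesis_split (equation : String) : Prop :=
  ¬ (equation.toList.head? = some '(' ∧
     ((pvCloseIdx equation.toList = none ∧ equation.toList.length = 1) ∨
      pvCloseIdx equation.toList = some (equation.toList.length - 2)))
instance (equation : String) : Decidable (Pre_parenthesis_split equation) := by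
  unfold Pre_parenthesis_split; infer_instance

def pvWitness_parenthesis_split : String := "(a)+(b)"

def Spec_parenthesis_split (equation : String) (out : List String) : Prop := out = parenthesis_split_alt equation
instance (equation : String) (out : List String) : Decidable (Spec_parenthesis_split equation out) := by unfold Spec_parenthesis_split; infer_instance

-- ===== CLAIM (what is proved, stated in full; the proofs are below) =====
def Claim_equal_parenthesis_split : Prop := ∀ (equation : String), Dom_parenthesis_split equation → Pre_parenthesis_split equation → Spec_parenthesis_split equation (parenthesis_split equation)

-- ===== LEMMAS AND PROOFS =====

-- A-side helper for the proofs: the matching scan A's loop performs once the first '(' is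
-- found — running index and depth, stopping where depth returns to 0.
def pvFindClose : List Char → Int → Int → Int
  | [], _, _ => -1
  | c :: rest, j, depth =>
    if c = '(' then pvFindClose rest (j + 1) (depth + 1)
    else if c = ')' then
      (if depth - 1 = 0 then j else pvFindClose rest (j + 1) (depth - 1))
    else pvFindClose rest (j + 1) depth

-- Before the first '(' is found, the layer counter is irrelevant to A's loop result.
lemma pvLoopA_layer_irrel (cs : List Char) : ∀ (i l l' R : Int),
    pvLoopA cs i false l (-1) R = pvLoopA cs i false l' (-1) R := by
  induction cs with
  | nil => intro i l l' R; rfl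
  | cons c rest ih =>
    intro i l l' R
    by_cases hc : c = '('
    · simp [pvLoopA, hc]
    · by_cases hc' : c = ')' <;> simp [pvLoopA, hc, hc'] <;> exact ih _ _ _ _

-- A's loop over a '('-free list returns its accumulators unchanged.
lemma pvLoopA_no_open (cs : List Char) : ∀ (i l R : Int), '(' ∉ cs →
    pvLoopA cs i false l (-1) R = (-1, R) := by
  induction cs with
  | nil => intro i l R _; rfl
  | cons c rest ih =>
    intro i l R h
    have hc : c ≠ '(' := fun hh => h (hh ▸ List.mem_cons_self)
    have hrest : '(' ∉ rest := fun hh => h (List.mem_cons_of_mem _ hh)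
    by_cases hc' : c = ')' <;> simp [pvLoopA, hc, hc'] <;> exact ih _ _ _ hrest

-- A's loop skips a '('-free prefix (layer normalised to 0 by irrelevance).
lemma pvLoopA_skip (pre : List Char) : ∀ (cs : List Char) (i l R : Int), '(' ∉ pre →
    pvLoopA (pre ++ cs) i false l (-1) R = pvLoopA cs (i + pre.length) false 0 (-1) R := by
  induction pre with
  | nil => intro cs i l R _; simp [pvLoopA_layer_irrel cs i l 0 R]
  | cons c rest ih =>
    intro cs i l R h
    have hc : c ≠ '(' := fun hh => h (hh ▸ List.mem_cons_self)
    have hrest : '(' ∉ rest := fun hh => h (List.mem_cons_of_mem _ hh)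
    have step : pvLoopA (c :: (rest ++ cs)) i false l (-1) R
        = pvLoopA (rest ++ cs) (i + 1) false (if c = ')' then l - 1 else l) (-1) R := by
      by_cases hc' : c = ')' <;> simp [pvLoopA, hc, hc']
    have harg : i + 1 + (rest.length : Int) = i + ((c :: rest).length : Int) := by
      push_cast [List.length_cons]; ring
    rw [List.cons_append, step, ih cs (i + 1) _ R hrest, harg]

-- After the first '(' (depth ≥ 1), A's loop computes exactly the matching scan.
lemma pvLoopA_found (cs : List Char) : ∀ (i d L : Int), 1 ≤ d →
    pvLoopA cs i true d L (-1) = (L, pvFindClose cs i d) := by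
  induction cs with
  | nil => intro i d L _; rfl
  | cons c rest ih =>
    intro i d L hd
    by_cases hc : c = '('
    · have : ¬ (d + 1 = 0) := by omega
      simp [pvLoopA, pvFindClose, hc, this]
      exact ih _ _ _ (by omega)
    · by_cases hc' : c = ')'
      · by_cases hz : d - 1 = 0
        · simp [pvLoopA, pvFindClose, hc, hc', hz]
        · simp [pvLoopA, pvFindClose, hc, hc', hz]
          exact ih _ _ _ (by omega)
      · have : ¬ (d = 0) := by omega
        simp [pvLoopA, pvFindClose, hc, hc', this]
        exact ih _ _ _ hd

-- find on a singleton pattern: first-occurrence decomposition gives the prefix length.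
lemma pvFind_singleton (pre rest : List Char) (h : '(' ∉ pre) :
    PySem.Chars.find (pre ++ '(' :: rest) ['('] = (pre.length : Int) := by
  set s := pre ++ '(' :: rest with hs
  have hinf : ['('] <:+: s := ⟨pre, rest, by simp [hs]⟩
  have hnn : 0 ≤ PySem.Chars.find s ['('] := by
    rw [PySem.Chars.find_nonneg_iff]; exact hinf
  obtain ⟨hpref, hmin⟩ := PySem.Chars.find_spec (s := s) (sub := ['(']) hnn
  have hat : ['('] <+: s.drop pre.length := by simp [hs]
  have hle : (PySem.Chars.find s ['(']).toNat ≤ pre.length := by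
    by_contra hgt
    exact hmin pre.length (by omega) hat
  have hge : ¬ (PySem.Chars.find s ['(']).toNat < pre.length := by
    intro hlt
    obtain ⟨t, ht⟩ := hpref
    have hdrop : s.drop (PySem.Chars.find s ['(']).toNat = '(' :: t := by
      rw [← ht]; rfl
    have h0 : (s.drop (PySem.Chars.find s ['(']).toNat)[0]? = some '(' := by
      rw [hdrop]; rfl
    have hsome : s[(PySem.Chars.find s ['(']).toNat]? = some '(' := by
      rw [List.getElem?_drop] at h0
      simpa using h0
    have hpre' : s[(PySem.Chars.find s ['(']).toNat]? = pre[(PySem.Chars.find s ['(']).toNat]? := by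
      rw [hs, List.getElem?_append_left hlt]
    exact h (List.mem_of_getElem? (hpre' ▸ hsome))
  omega

-- First-occurrence decomposition of a list around a member.
lemma pvFirstSplit {l : List Char} {a : Char} (h : a ∈ l) :
    ∃ s t, l = s ++ a :: t ∧ a ∉ s := by
  induction l with
  | nil => cases h
  | cons c rest ih =>
    by_cases hc : c = a
    · exact ⟨[], rest, by simp [hc], by simp⟩
    · obtain ⟨s, t, hdec, hns⟩ := ih (by cases h with
        | head => exact absurd rfl hc
        | tail _ h => exact h)
      refine ⟨c :: s, t, by simp [hdec], ?_⟩
      intro hmem'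
      rcases List.mem_cons.mp hmem' with h1 | h2
      · exact hc h1.symm
      · exact hns h2

-- balance of a cons, by head character
lemma pvBal_cons_open (t : List Char) : pvBal ('(' :: t) = 1 + pvBal t := by
  simp [pvBal]; ring

lemma pvBal_cons_close (t : List Char) : pvBal (')' :: t) = pvBal t - 1 := by
  simp [pvBal]; ring

lemma pvBal_cons_other (c : Char) (t : List Char) (h1 : c ≠ '(') (h2 : c ≠ ')') :
    pvBal (c :: t) = pvBal t := by
  simp [pvBal, h1, h2]

-- The matching scan equals the first index (offset by i) at which the running balance
-- returns to 0 at a ')'.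
lemma pvFindClose_eq_find? (rest : List Char) : ∀ (i d : Int),
    pvFindClose rest i d =
      (match (List.range rest.length).find?
          (fun k => (rest[k]? == some ')') && decide (d + pvBal (rest.take (k + 1)) = 0)) with
       | some k => i + (k : Int)
       | none => -1) := by
  induction rest with
  | nil => intro i d; rfl
  | cons c rest ih =>
    intro i d
    rw [show (c :: rest).length = rest.length + 1 from rfl, List.range_succ_eq_map,
      List.find?_cons]
    by_cases hc : c = '('
    · subst hc
      have hp0 : ((('(' :: rest : List Char))[0]? == some ')') = false := by simp
      rw [hp0]
      simp only [Bool.false_and, List.find?_map]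
      have hpred : ∀ k : Nat,
          ((fun k => ((('(' :: rest : List Char))[k]? == some ')') && decide (d + pvBal (('(' :: rest).take (k + 1)) = 0)) ∘ Nat.succ) k
            = (fun k => (rest[k]? == some ')') && decide ((d + 1) + pvBal (rest.take (k + 1)) = 0)) k := by
        intro k
        simp only [Function.comp]
        rw [show (('(' :: rest : List Char))[k + 1]? = rest[k]? from rfl,
          show ('(' :: rest).take (k + 1 + 1) = '(' :: rest.take (k + 1) from rfl,
          pvBal_cons_open]
        congr 1
        simp only [decide_eq_decide]
        omega
      rw [funext hpred, pvFindClose, if_pos rfl, ih (i + 1) (d + 1)]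
      cases hfind : (List.range rest.length).find?
          (fun k => (rest[k]? == some ')') && decide ((d + 1) + pvBal (rest.take (k + 1)) = 0)) with
      | none => simp
      | some k => simp [Nat.succ_eq_add_one]; push_cast; ring
    · by_cases hc' : c = ')'
      · subst hc'
        have hbal : pvBal ((')' :: rest).take (0 + 1)) = -1 := by
          rw [show (')' :: rest).take (0 + 1) = [')'] from rfl]; decide
        by_cases hz : d - 1 = 0
        · have hp0 : ((((')' :: rest : List Char))[0]? == some ')') &&
              decide (d + pvBal ((')' :: rest).take (0 + 1)) = 0)) = true := by
            rw [hbal]; simp; omega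
          rw [hp0, pvFindClose, if_neg (by decide), if_pos rfl, if_pos hz]
          simp
        · have hp0 : ((((')' :: rest : List Char))[0]? == some ')') &&
              decide (d + pvBal ((')' :: rest).take (0 + 1)) = 0)) = false := by
            rw [hbal]; simp; omega
          rw [hp0]
          simp only [List.find?_map]
          have hpred : ∀ k : Nat,
              ((fun k => (((')' :: rest : List Char))[k]? == some ')') && decide (d + pvBal ((')' :: rest).take (k + 1)) = 0)) ∘ Nat.succ) k
                = (fun k => (rest[k]? == some ')') && decide ((d - 1) + pvBal (rest.take (k + 1)) = 0)) k := by
            intro k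
            simp only [Function.comp]
            rw [show ((')' :: rest : List Char))[k + 1]? = rest[k]? from rfl,
              show (')' :: rest).take (k + 1 + 1) = ')' :: rest.take (k + 1) from rfl,
              pvBal_cons_close]
            congr 1
            simp only [decide_eq_decide]
            omega
          rw [funext hpred, pvFindClose, if_neg (by decide), if_pos rfl, if_neg hz,
            ih (i + 1) (d - 1)]
          cases hfind : (List.range rest.length).find?
              (fun k => (rest[k]? == some ')') && decide ((d - 1) + pvBal (rest.take (k + 1)) = 0)) with
          | none => simp
          | some k => simp [Nat.succ_eq_add_one]; push_cast; ring
      · have hp0 : (((c :: rest : List Char))[0]? == some ')') = false := by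
          simp [hc']
        rw [hp0]
        simp only [Bool.false_and, List.find?_map]
        have hpred : ∀ k : Nat,
            ((fun k => (((c :: rest : List Char))[k]? == some ')') && decide (d + pvBal ((c :: rest).take (k + 1)) = 0)) ∘ Nat.succ) k
              = (fun k => (rest[k]? == some ')') && decide (d + pvBal (rest.take (k + 1)) = 0)) k := by
          intro k
          simp only [Function.comp]
          rw [show ((c :: rest : List Char))[k + 1]? = rest[k]? from rfl,
            show (c :: rest).take (k + 1 + 1) = c :: rest.take (k + 1) from rfl,
            pvBal_cons_other c _ hc hc']
        rw [funext hpred, pvFindClose, if_neg hc, if_neg hc', ih (i + 1) d]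
        cases hfind : (List.range rest.length).find?
            (fun k => (rest[k]? == some ')') && decide (d + pvBal (rest.take (k + 1)) = 0)) with
        | none => simp
        | some k => simp [Nat.succ_eq_add_one]; push_cast; ring

-- B's counting search over range(1, n), on a string starting with '(', computes A's
-- matching-scan result pvFindClose rest 1 1.
lemma pvCloseB_eq (rest : List Char) :
    (match (PySem.List.pyRange 1 ((('(' :: rest : List Char).length : Int)) 1).find?
        (fun j => (PySem.List.pyGet? ('(' :: rest) j == some ')') &&
          ((PySem.List.slice ('(' :: rest) none (some (j + 1))).count '(' ==
           (PySem.List.slice ('(' :: rest) none (some (j + 1))).count ')')) with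
     | some j => j
     | none => -1) = pvFindClose rest 1 1 := by
  have hn : ((('(' :: rest : List Char).length : Int)) = 1 + (rest.length : Int) := by
    simp [List.length_cons]; ring
  rw [hn, PySem.List.pyRange_one 1 (1 + (rest.length : Int)),
    show ((1 : Int) + rest.length - 1).toNat = rest.length by omega, List.find?_map]
  have hpred : ∀ k : Nat,
      ((fun j => (PySem.List.pyGet? ('(' :: rest) j == some ')') &&
          ((PySem.List.slice ('(' :: rest) none (some (j + 1))).count '(' ==
           (PySem.List.slice ('(' :: rest) none (some (j + 1))).count ')')) ∘ (fun k : Nat => (1 : Int) + k)) k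
        = (fun k => (rest[k]? == some ')') && decide ((1 : Int) + pvBal (rest.take (k + 1)) = 0)) k := by
    intro k
    simp only [Function.comp]
    have h1 : (1 : Int) + (k : Int) = ((k + 1 : Nat) : Int) := by push_cast; ring
    have h2 : (1 : Int) + (k : Int) + 1 = ((k + 2 : Nat) : Int) := by push_cast; ring
    rw [h2, h1, PySem.List.pyGet?_natCast, PySem.List.slice_to_natCast,
      show ('(' :: rest)[k + 1]? = rest[k]? from rfl,
      show ('(' :: rest).take (k + 2) = '(' :: rest.take (k + 1) from rfl]
    congr 1
    rw [show (('(' :: rest.take (k + 1)).count '(') = (rest.take (k + 1)).count '(' + 1 by simp,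
      show (('(' :: rest.take (k + 1)).count ')') = (rest.take (k + 1)).count ')' by simp,
      show ((rest.take (k + 1)).count '(' + 1 == (rest.take (k + 1)).count ')')
          = decide ((rest.take (k + 1)).count '(' + 1 = (rest.take (k + 1)).count ')') by
        cases Nat.decEq ((rest.take (k + 1)).count '(' + 1) ((rest.take (k + 1)).count ')') <;> simp_all]
    simp only [decide_eq_decide, pvBal]
    omega
  rw [funext hpred, pvFindClose_eq_find? rest 1 1]
  cases hfind : (List.range rest.length).find?
      (fun k => (rest[k]? == some ')') && decide ((1 : Int) + pvBal (rest.take (k + 1)) = 0)) with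
  | none => simp
  | some k => simp

-- ===== VERDICT (by name: the statement is the Claim_ definition above) =====
theorem parenthesis_split_spec : Claim_equal_parenthesis_split := by
  intro equation _ _
  unfold Spec_parenthesis_split parenthesis_split parenthesis_split_alt
  by_cases hmem : '(' ∈ equation.toList
  · obtain ⟨pre, rest, hdec, hpre⟩ := pvFirstSplit hmem
    have hfindC : PySem.Chars.find equation.toList ['('] = (pre.length : Int) := by
      rw [hdec]; exact pvFind_singleton pre rest hpre
    have hloop : pvLoopA equation.toList 0 false 0 (-1) (-1)
        = ((pre.length : Int), pvFindClose rest ((pre.length : Int) + 1) 1) := by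
      rw [hdec, pvLoopA_skip pre _ 0 0 (-1) hpre]
      have hfound := pvLoopA_found rest ((pre.length : Int) + 1) 1 (pre.length : Int) (by omega)
      simp [pvLoopA] at hfound ⊢
      exact hfound
    by_cases hpos : 0 < (pre.length : Int)
    · have hne : ¬ ((pre.length : Int) = -1) := by omega
      have hposn : 0 < pre.length := by exact_mod_cast hpos
      simp [hloop, hfindC, hne, hpos, hposn]
    · have h0 : pre.length = 0 := by omega
      have hnil : pre = [] := List.length_eq_zero_iff.mp h0
      subst hnil
      simp only [List.nil_append] at hdec
      have hclose := pvCloseB_eq rest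
      rw [← hdec] at hclose
      rw [show ((equation.toList.length : Int)) = ((equation.length : Int)) by simp] at hclose
      by_cases hR : pvFindClose rest 1 1 = (equation.length : Int) - 1 <;>
        simp [hloop, hfindC, hclose, hR]
  · have hfindC : PySem.Chars.find equation.toList ['('] = -1 := by
      rw [PySem.Chars.find_eq_neg_one_iff]
      intro hinf
      exact hmem (hinf.sublist.subset (by simp))
    have hloop : pvLoopA equation.toList 0 false 0 (-1) (-1) = (-1, -1) :=
      pvLoopA_no_open _ 0 0 (-1) hmem
    simp [hloop, hfindC]
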